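-- pv_equiv track=rewrite | github.com/sp00ks-L/MastersDissertation | Data Generation/helpers.py | get_origin_locs
-- ===== SOURCE A (Python) =====
-- def get_origin_locs(origin_labels):
--     """
--     This function retrieves the index of the start and end of an origin
--     it then 'extends' this window by performing start - 5000 and end + 2000
--     this widens the window around the origin so it can then be passed to my sampler
--     by providing genomic regions like this, we have a relatively wide region with a good chance
--     of it including an origin of interest
--     """
--     curr = 0
--     index_start = []
--     index_end = []
--
--     for i in range(len(origin_labels)):
--         if origin_labels[i] and not curr:
--             curr = 1
--             index_start.append(i - 5000)
--         elif not origin_labels[i] and curr: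
--             curr = 0
--             index_end.append(i + 2000)
--
--     return index_start, index_end
-- ===== SOURCE B (Python) =====
-- from itertools import groupby
--
-- def get_origin_locs(origin_labels):
--     """
--     Run-based reimplementation: group consecutive equal-truthiness labels with
--     itertools.groupby, keep a running position, and emit start-5000 for each
--     truthy run and end+2000 for each truthy run terminated inside the sequence.
--     """
--     index_start = []
--     index_end = []
--     n = len(origin_labels)
--     pos = 0
--     for key, grp in groupby(origin_labels, key=bool):
--         end = pos + sum(1 for _ in grp)
--         if key:
--             index_start.append(pos - 5000)
--             if end < n:
--                 index_end.append(end + 2000)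
--         pos = end
--     return index_start, index_end
-- ===== Notes on version B (the rewrite author's own statement) =====
-- stated objective: idiomatic
-- what changed: Replaced the element-at-a-time 0/1 flag scan with an itertools.groupby run-at-a-time pass that keeps a running position and emits start-5000 per truthy run and end+2000 per truthy run terminated inside the sequence.
import Mathlib
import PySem

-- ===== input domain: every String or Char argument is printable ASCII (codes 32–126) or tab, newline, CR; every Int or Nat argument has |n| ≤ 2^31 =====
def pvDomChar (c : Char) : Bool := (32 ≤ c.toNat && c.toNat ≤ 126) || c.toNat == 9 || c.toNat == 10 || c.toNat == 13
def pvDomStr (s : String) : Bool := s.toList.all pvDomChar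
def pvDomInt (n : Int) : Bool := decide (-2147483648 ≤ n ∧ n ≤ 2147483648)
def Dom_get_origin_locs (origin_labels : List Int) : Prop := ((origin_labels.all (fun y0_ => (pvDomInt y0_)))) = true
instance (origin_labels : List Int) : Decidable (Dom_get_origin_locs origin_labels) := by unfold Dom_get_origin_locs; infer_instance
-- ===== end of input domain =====

-- B re-implements A's element-at-a-time flag scan as a run-at-a-time groupby pass (objective: idiomatic); same return value, no side effects.

-- ===== PORT A =====
-- A's for-loop over indices with the 0/1 flag `curr`, as structural recursion carrying the index i.
def pvALoop : List Int → Int → Int → List Int → List Int → List Int × List Int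
  | [], _, _, s, e => (s, e)
  | x :: rest, i, curr, s, e =>
    if x ≠ 0 ∧ curr = 0 then pvALoop rest (i + 1) 1 (s ++ [i - 5000]) e
    else if x = 0 ∧ curr ≠ 0 then pvALoop rest (i + 1) 0 s (e ++ [i + 2000])
    else pvALoop rest (i + 1) curr s e

def get_origin_locs (origin_labels : List Int) : List Int × List Int :=
  pvALoop origin_labels 0 0 [] []

-- ===== PORT B =====
-- B's groupby loop: each step consumes one maximal run of equal-truthiness labels
-- (takeWhile/dropWhile = one `groupby` group), keeping the running position `pos`.
def pvBGo (l : List Int) (pos n : Int) : List Int × List Int :=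
  match l with
  | [] => ([], [])
  | x :: rest =>
    if x = 0 then
      pvBGo (rest.dropWhile (· == 0)) (pos + 1 + ((rest.takeWhile (· == 0)).length : Int)) n
    else
      let endx : Int := pos + 1 + ((rest.takeWhile (· != 0)).length : Int)
      let r := pvBGo (rest.dropWhile (· != 0)) endx n
      ((pos - 5000) :: r.1, if endx < n then (endx + 2000) :: r.2 else r.2)
  termination_by l.length
  decreasing_by
  · exact Nat.lt_succ_of_le (List.length_dropWhile_le _ rest)
  · exact Nat.lt_succ_of_le (List.length_dropWhile_le _ rest)

def get_origin_locs_alt (origin_labels : List Int) : List Int × List Int :=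
  pvBGo origin_labels 0 (origin_labels.length : Int)

-- ===== PRECONDITION & SPEC =====
def Spec_get_origin_locs (origin_labels : List Int) (out : List Int × List Int) : Prop := out = get_origin_locs_alt origin_labels
instance (origin_labels : List Int) (out : List Int × List Int) : Decidable (Spec_get_origin_locs origin_labels out) := by unfold Spec_get_origin_locs; infer_instance

-- ===== CLAIM (what is proved, stated in full; the proofs are below) =====
def Claim_equal_get_origin_locs : Prop := ∀ (origin_labels : List Int), Dom_get_origin_locs origin_labels → Spec_get_origin_locs origin_labels (get_origin_locs origin_labels)

-- ===== LEMMAS AND PROOFS =====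

lemma pv_len_split (p : Int → Bool) (l : List Int) :
    (l.takeWhile p).length + (l.dropWhile p).length = l.length := by
  have h := congrArg List.length (List.takeWhile_append_dropWhile (p := p) (l := l))
  rw [List.length_append] at h
  exact h

lemma pv_drop_head (p : Int → Bool) (l : List Int) (z : Int) (t : List Int)
    (h : l.dropWhile p = z :: t) : p z = false := by
  have hne : l.dropWhile p ≠ [] := by simp [h]
  have h2 := List.head_dropWhile_not (l := l) (p := p) hne
  simp only [h, List.head_cons] at h2
  simpa using h2

-- one-step equations for A's loop
lemma pvA_start (x : Int) (rest : List Int) (i : Int) (s e : List Int) (hx : x ≠ 0) :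
    pvALoop (x :: rest) i 0 s e = pvALoop rest (i + 1) 1 (s ++ [i - 5000]) e := by
  simp [pvALoop, hx]

lemma pvA_skip (x : Int) (rest : List Int) (i : Int) (s e : List Int) (hx : x = 0) :
    pvALoop (x :: rest) i 0 s e = pvALoop rest (i + 1) 0 s e := by
  simp [pvALoop, hx]

lemma pvA_run (x : Int) (rest : List Int) (i : Int) (s e : List Int) (hx : x ≠ 0) :
    pvALoop (x :: rest) i 1 s e = pvALoop rest (i + 1) 1 s e := by
  simp [pvALoop, hx]

lemma pvA_end (x : Int) (rest : List Int) (i : Int) (s e : List Int) (hx : x = 0) :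
    pvALoop (x :: rest) i 1 s e = pvALoop rest (i + 1) 0 s (e ++ [i + 2000]) := by
  simp [pvALoop, hx]

-- one-step equations for B's loop
lemma pvB_zero (x : Int) (rest : List Int) (pos n : Int) (hx : x = 0) :
    pvBGo (x :: rest) pos n =
      pvBGo (rest.dropWhile (· == 0)) (pos + 1 + ((rest.takeWhile (· == 0)).length : Int)) n := by
  rw [pvBGo]; simp [hx]

lemma pvB_pos (x : Int) (rest : List Int) (pos n : Int) (hx : x ≠ 0) :
    pvBGo (x :: rest) pos n =
      ((pos - 5000) :: (pvBGo (rest.dropWhile (· != 0)) (pos + 1 + ((rest.takeWhile (· != 0)).length : Int)) n).1,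
       if pos + 1 + ((rest.takeWhile (· != 0)).length : Int) < n then
         (pos + 1 + ((rest.takeWhile (· != 0)).length : Int) + 2000)
           :: (pvBGo (rest.dropWhile (· != 0)) (pos + 1 + ((rest.takeWhile (· != 0)).length : Int)) n).2
       else (pvBGo (rest.dropWhile (· != 0)) (pos + 1 + ((rest.takeWhile (· != 0)).length : Int)) n).2) := by
  rw [pvBGo]; simp [hx]

-- a leading-zero group may be consumed one element at a time
lemma pvBGo_zero (rest : List Int) (pos n : Int) :
    pvBGo (0 :: rest) pos n = pvBGo rest (pos + 1) n := by
  cases rest with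
  | nil => simp [pvBGo]
  | cons y t =>
    by_cases hy : y = 0
    · subst hy
      rw [pvB_zero 0 (0 :: t) pos n rfl, pvB_zero 0 t (pos + 1) n rfl]
      simp only [List.takeWhile_cons, List.dropWhile_cons]
      norm_num
      congr 1
      ring
    · rw [pvB_zero 0 (y :: t) pos n rfl]
      simp [hy]

-- A's loop with the flag set: it consumes the nonzero run, then (if anything is left)
-- emits the end index and continues with the flag cleared.
lemma pvALoop_one (l : List Int) (pos : Int) (s e : List Int) :
    pvALoop l pos 1 s e =
      if l.dropWhile (· != 0) = [] then (s, e)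
      else pvALoop (l.dropWhile (· != 0)).tail
            (pos + ((l.takeWhile (· != 0)).length : Int) + 1) 0 s
            (e ++ [pos + ((l.takeWhile (· != 0)).length : Int) + 2000]) := by
  induction l generalizing pos with
  | nil => simp [pvALoop]
  | cons y t ih =>
    by_cases hy : y = 0
    · subst hy
      rw [pvA_end 0 t pos s e rfl]
      simp
    · rw [pvA_run y t pos s e hy, ih (pos + 1)]
      have hb : (y != 0) = true := by simpa using hy
      simp only [List.takeWhile_cons, List.dropWhile_cons, hb, if_true, List.length_cons]
      have e1 : pos + (((t.takeWhile (· != 0)).length : Nat) + 1 : Nat) + 1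
          = pos + 1 + ((t.takeWhile (· != 0)).length : Int) + 1 := by push_cast; ring
      have e2 : pos + (((t.takeWhile (· != 0)).length : Nat) + 1 : Nat) + 2000
          = pos + 1 + ((t.takeWhile (· != 0)).length : Int) + 2000 := by push_cast; ring
      rw [e1, e2]

-- main invariant: A's flag-clear loop equals B's run loop, up to the accumulators
lemma pv_main (m : Nat) : ∀ (l : List Int), l.length ≤ m → ∀ (pos : Int) (s e : List Int) (n : Int),
    n = pos + (l.length : Int) →
    pvALoop l pos 0 s e = (s ++ (pvBGo l pos n).1, e ++ (pvBGo l pos n).2) := by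
  induction m with
  | zero =>
    intro l hl pos s e n _
    have : l = [] := List.eq_nil_of_length_eq_zero (Nat.le_zero.mp hl)
    subst this
    simp [pvALoop, pvBGo]
  | succ m ih =>
    intro l hl pos s e n hn
    cases l with
    | nil => simp [pvALoop, pvBGo]
    | cons x rest =>
      by_cases hx : x = 0
      · subst hx
        rw [pvA_skip 0 rest pos s e rfl, pvBGo_zero]
        exact ih rest (Nat.le_of_succ_le_succ hl) (pos + 1) s e n
          (by simp only [List.length_cons] at hn; push_cast at hn ⊢; omega)
      · rw [pvA_start x rest pos s e hx, pvALoop_one, pvB_pos x rest pos n hx]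
        set k : Nat := (rest.takeWhile (· != 0)).length with hk
        have hsplit : k + (rest.dropWhile (· != 0)).length = rest.length :=
          pv_len_split _ rest
        rcases hd : rest.dropWhile (· != 0) with _ | ⟨z, t⟩
        · -- trailing run: no end emitted by either side
          rw [if_pos rfl]
          have hrest : k = rest.length := by
            rw [hd] at hsplit; simpa using hsplit
          have hnot : ¬ ((pos + 1 + (k : Int)) < n) := by
            simp only [List.length_cons] at hn
            push_cast at hn
            omega
          rw [if_neg hnot]
          simp [pvBGo]
        · -- run terminated inside the list
          have hz : z = 0 := by
            have := pv_drop_head (· != 0) rest z t hd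
            simpa using this
          subst hz
          have hcond : ((0 : Int) :: t : List Int) ≠ [] := by simp
          rw [if_neg hcond]
          simp only [List.tail_cons]
          have htlen : t.length ≤ m := by
            rw [hd] at hsplit
            simp only [List.length_cons] at hsplit hl
            omega
          have hn' : n = (pos + 1 + (k : Int) + 1) + (t.length : Int) := by
            rw [hd] at hsplit
            simp only [List.length_cons] at hn hsplit
            push_cast at hn ⊢
            omega
          have hlt : (pos + 1 + (k : Int)) < n := by
            rw [hn']; omega
          rw [pvBGo_zero, ih t htlen _ _ _ n hn', if_pos hlt]
          simp

-- ===== VERDICT (by name: the statement is the Claim_ definition above) =====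
theorem get_origin_locs_spec : Claim_equal_get_origin_locs := by
  intro l _
  unfold Spec_get_origin_locs get_origin_locs get_origin_locs_alt
  rw [pv_main l.length l le_rfl 0 [] [] (l.length : Int) (by ring)]
  simp
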